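-- pv_equiv track=rewrite | github.com/Julesc013/dominium | src/client/render/render_model_adapter.py | _normalize_layers
-- ===== SOURCE A (Python) =====
-- from typing import Dict, List, Tuple
--
-- _ALLOWED_LAYER_TAGS = {"world", "ui", "overlay", "debug"}
--
-- def _normalize_layers(layer_tags: List[object]) -> List[str]:
--     tags = sorted(set(str(item).strip() for item in (layer_tags or []) if str(item).strip()))
--     filtered = [tag for tag in tags if tag in _ALLOWED_LAYER_TAGS]
--     if not filtered:
--         return ["world"]
--     if "world" in filtered:
--         return ["world"] + [tag for tag in filtered if tag != "world"]
--     return filtered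
-- ===== SOURCE B (Python) =====
-- _ALLOWED_LAYER_TAGS = {"world", "ui", "overlay", "debug"}
--
-- def _normalize_layers(layer_tags):
--     present = {str(item).strip() for item in (layer_tags or [])}
--     out = [tag for tag in ("world", "debug", "overlay", "ui") if tag in present]
--     return out if out else ["world"]
-- ===== Notes on version B (the rewrite author's own statement) =====
-- stated objective: simpler
-- what changed: B builds one set of stripped inputs and collects the allowed tags by scanning a fixed priority tuple, replacing A's sort plus hoist-world branch with a single ordered membership scan.
import Mathlib
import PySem

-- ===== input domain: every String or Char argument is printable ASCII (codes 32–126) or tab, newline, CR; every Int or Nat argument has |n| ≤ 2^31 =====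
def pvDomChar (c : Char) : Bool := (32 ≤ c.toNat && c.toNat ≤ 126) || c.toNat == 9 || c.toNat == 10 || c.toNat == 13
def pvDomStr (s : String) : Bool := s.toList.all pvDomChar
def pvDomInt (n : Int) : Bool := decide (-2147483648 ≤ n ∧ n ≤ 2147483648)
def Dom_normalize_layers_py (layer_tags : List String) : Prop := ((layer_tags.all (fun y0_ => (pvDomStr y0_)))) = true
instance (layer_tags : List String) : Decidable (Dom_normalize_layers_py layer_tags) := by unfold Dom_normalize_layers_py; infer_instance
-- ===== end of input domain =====

-- B replaces A's sort-then-hoist-world with a single membership scan over the fixed priority order; objective: simpler.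

-- ===== PORT A =====
def allowedLayerTags : PySem.Set String := PySem.Set.ofList ["world", "ui", "overlay", "debug"]

def normalize_layers_py (layer_tags : List String) : List String :=
  let tags := PySem.List.sorted
    (PySem.Set.ofList ((layer_tags.map PySem.Str.strip).filter (fun s => s ≠ "")))
    (fun x => x) false
  let filtered := tags.filter (fun t => PySem.Set.contains allowedLayerTags t)
  if filtered = [] then ["world"]
  else if filtered.contains "world" then "world" :: filtered.filter (fun t => t ≠ "world")
  else filtered

-- ===== PORT B =====
def normalize_layers_py_alt (layer_tags : List String) : List String :=
  let present := PySem.Set.ofList (layer_tags.map PySem.Str.strip)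
  let out := ["world", "debug", "overlay", "ui"].filter (fun t => PySem.Set.contains present t)
  if out = [] then ["world"] else out

-- ===== PRECONDITION & SPEC =====
def Spec_normalize_layers_py (layer_tags : List String) (out : List String) : Prop := out = normalize_layers_py_alt layer_tags
instance (layer_tags : List String) (out : List String) : Decidable (Spec_normalize_layers_py layer_tags out) := by unfold Spec_normalize_layers_py; infer_instance

-- ===== CLAIM (what is proved, stated in full; the proofs are below) =====
def Claim_equal_normalize_layers_py : Prop := ∀ (layer_tags : List String), Dom_normalize_layers_py layer_tags → Spec_normalize_layers_py layer_tags (normalize_layers_py layer_tags)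

-- ===== LEMMAS AND PROOFS =====

-- A's sorted-deduped-filtered list equals the canonical increasing allowed list filtered by membership in the stripped inputs.
theorem filtered_canonical (P : List String) :
    ((PySem.List.sorted (PySem.Set.ofList (P.filter (fun s => s ≠ ""))) (fun x => x) false).filter
        (fun t => PySem.Set.contains allowedLayerTags t))
    = ["debug", "overlay", "ui", "world"].filter (fun t => decide (t ∈ P)) := by
  have hpair := PySem.List.sorted_ofList_pairwise_lt (P.filter (fun s => s ≠ ""))
  have hL := hpair.filter (fun t => PySem.Set.contains allowedLayerTags t)
  have hR : (["debug", "overlay", "ui", "world"].filter (fun t => decide (t ∈ P))).Pairwise (· < ·) := by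
    apply List.Pairwise.filter
    simp [String.lt_iff_toList_lt]
    decide
  have hperm : (List.filter (fun t => allowedLayerTags.contains t)
      (PySem.List.sorted (PySem.Set.ofList (List.filter (fun s => decide (s ≠ "")) P)) fun x => x)).Perm
      (List.filter (fun t => decide (t ∈ P)) ["debug", "overlay", "ui", "world"]) := by
    rw [List.perm_ext_iff_of_nodup (hL.imp fun h => ne_of_lt h) (hR.imp fun h => ne_of_lt h)]
    intro a
    simp only [List.mem_filter, PySem.List.mem_sorted, PySem.Set.mem_ofList, allowedLayerTags,
      PySem.Set.contains_eq_listContains, List.contains_eq_mem, decide_eq_true_eq]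
    by_cases hP : a ∈ P <;> simp [hP] <;> aesop
  exact hperm.eq_of_pairwise (fun a b _ _ h1 h2 => absurd h2 (lt_asymm h1)) hL hR

theorem main_eq (lt : List String) : normalize_layers_py lt = normalize_layers_py_alt lt := by
  simp only [normalize_layers_py, normalize_layers_py_alt]
  rw [filtered_canonical (lt.map PySem.Str.strip)]
  generalize lt.map PySem.Str.strip = P
  by_cases hw : "world" ∈ P <;>
  by_cases hd : "debug" ∈ P <;>
  by_cases ho : "overlay" ∈ P <;>
  by_cases hu : "ui" ∈ P <;>
    simp [hw, hd, ho, hu, PySem.Set.contains_eq_listContains, PySem.Set.mem_ofList,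
      List.contains_eq_mem]

-- ===== VERDICT (by name: the statement is the Claim_ definition above) =====
theorem normalize_layers_py_spec : Claim_equal_normalize_layers_py := by
  intro lt _
  exact main_eq lt
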